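-- pv_equiv track=rewrite | github.com/lennycampino/OpenHands | openhands/agenthub/aifmd_compliance_agent/response_parser.py | parse_regulatory_reference
-- ===== SOURCE A (Python) =====
-- from typing import Dict, List, Optional, Tuple, Union
--
-- def parse_regulatory_reference(text: str) -> List[Dict[str, str]]:
--     """Extract AIFMD regulatory references from text."""
--     references = []
--     lines = text.split('\n')
--     current_ref = {}
--
--     for line in lines:
--         if 'Article' in line or 'Annex' in line:
--             if current_ref:
--                 references.append(current_ref)
--             current_ref = {'reference': line.strip()}
--         elif current_ref and line.strip():
--             if 'content' in current_ref:
--                 current_ref['content'] += ' ' + line.strip()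
--             else:
--                 current_ref['content'] = line.strip()
--
--     if current_ref:
--         references.append(current_ref)
--
--     return references
-- ===== SOURCE B (Python) =====
-- def parse_regulatory_reference(text):
--     """Extract AIFMD regulatory references from text (segment-based rewrite)."""
--     lines = text.split('\n')
--
--     def is_header(line):
--         return 'Article' in line or 'Annex' in line
--
--     # drop everything before the first header line
--     while lines and not is_header(lines[0]):
--         lines.pop(0)
--
--     references = []
--     while lines:
--         header = lines.pop(0)
--         body = []
--         while lines and not is_header(lines[0]):
--             stripped = lines.pop(0).strip()
--             if stripped:
--                 body.append(stripped)
--         ref = {'reference': header.strip()}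
--         if body:
--             ref['content'] = ' '.join(body)
--         references.append(ref)
--     return references
-- ===== Notes on version B (the rewrite author's own statement) =====
-- stated objective: alternative
-- what changed: Replaces A's single-pass state machine that mutates a current-reference dict line by line with a segment decomposition: drop the prefix before the first header line, then for each header take the span of following non-header lines as the body and join its non-empty stripped lines into the content.
import Mathlib
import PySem

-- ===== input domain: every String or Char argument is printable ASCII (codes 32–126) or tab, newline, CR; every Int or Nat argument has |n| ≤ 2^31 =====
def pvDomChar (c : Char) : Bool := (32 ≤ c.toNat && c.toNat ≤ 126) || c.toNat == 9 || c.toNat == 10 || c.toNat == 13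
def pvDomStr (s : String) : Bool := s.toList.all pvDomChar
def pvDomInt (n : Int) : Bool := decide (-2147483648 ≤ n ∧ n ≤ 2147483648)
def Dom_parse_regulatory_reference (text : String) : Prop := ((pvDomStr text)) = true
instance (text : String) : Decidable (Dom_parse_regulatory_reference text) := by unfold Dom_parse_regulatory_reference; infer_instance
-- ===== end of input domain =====

-- B replaces A's single-pass mutable-dict state machine by a segment decomposition
-- (drop the prefix before the first header, then header + span of body lines per
-- segment); objective: alternative decomposition, same cost.

-- ===== PORT A =====
def pvStepA (st : List (List (String × String)) × PySem.Dict String String) (line : String) :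
    List (List (String × String)) × PySem.Dict String String :=
  if PySem.Str.isIn "Article" line || PySem.Str.isIn "Annex" line then
    ((if st.2.size ≠ 0 then st.1 ++ [st.2.items] else st.1),
      PySem.Dict.ofList [("reference", PySem.Str.strip line)])
  else if st.2.size ≠ 0 ∧ PySem.Str.strip line ≠ "" then
    if st.2.contains "content" then
      (st.1, st.2.modify "content" "" (fun v => v ++ (" " ++ PySem.Str.strip line)))
    else
      (st.1, st.2.insert "content" (PySem.Str.strip line))
  else st

-- text.split('\n'): the separator is the nonempty literal "\n", so split? is never none
def parse_regulatory_reference (text : String) : List (List (String × String)) :=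
  let lines := (PySem.Str.split? text "\n").getD []
  let st := lines.foldl pvStepA ([], PySem.Dict.empty)
  if st.2.size ≠ 0 then st.1 ++ [st.2.items] else st.1

-- ===== PORT B =====
def pvIsHeader (line : String) : Bool :=
  PySem.Str.isIn "Article" line || PySem.Str.isIn "Annex" line

def pvCollect (xs : List String) : List String :=
  (xs.map PySem.Str.strip).filter (· ≠ "")

def pvMkEntry (header : String) (body : List String) : List (String × String) :=
  ("reference", PySem.Str.strip header) ::
    (if body = [] then [] else [("content", PySem.Str.join " " body)])

def pvGoB : List String → List (List (String × String))
  | [] => []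
  | h :: rest =>
      pvMkEntry h (pvCollect (rest.takeWhile (fun l => !pvIsHeader l))) ::
        pvGoB (rest.dropWhile (fun l => !pvIsHeader l))
termination_by ls => ls.length
decreasing_by
  have := List.length_dropWhile_le (fun l => !pvIsHeader l) rest
  simp only [List.length_cons]
  omega

def parse_regulatory_reference_alt (text : String) : List (List (String × String)) :=
  pvGoB (((PySem.Str.split? text "\n").getD []).dropWhile (fun l => !pvIsHeader l))

-- ===== PRECONDITION & SPEC =====
def Spec_parse_regulatory_reference (text : String) (out : List (List (String × String))) : Prop := out = parse_regulatory_reference_alt text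
instance (text : String) (out : List (List (String × String))) : Decidable (Spec_parse_regulatory_reference text out) := by unfold Spec_parse_regulatory_reference; infer_instance

-- ===== CLAIM (what is proved, stated in full; the proofs are below) =====
def Claim_equal_parse_regulatory_reference : Prop := ∀ (text : String), Dom_parse_regulatory_reference text → Spec_parse_regulatory_reference text (parse_regulatory_reference text)

-- ===== LEMMAS AND PROOFS =====

-- the (only) shapes A's current_ref dict takes: reference alone, or reference + joined content
lemma pvIsHeader_def (l : String) :
    (PySem.Str.isIn "Article" l || PySem.Str.isIn "Annex" l) = pvIsHeader l := rfl

def pvEntryOf (r : String) (bs : List String) : List (String × String) :=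
  ("reference", r) :: (if bs = [] then [] else [("content", PySem.Str.join " " bs)])

def pvFinish (st : List (List (String × String)) × PySem.Dict String String) :
    List (List (String × String)) :=
  if st.2.size ≠ 0 then st.1 ++ [st.2.items] else st.1

lemma pvCharsJoin_snoc (sep x : List Char) (ps : List (List Char)) (h : ps ≠ []) :
    PySem.Chars.join sep (ps ++ [x]) = PySem.Chars.join sep ps ++ sep ++ x := by
  induction ps with
  | nil => cases h rfl
  | cons p ps ih =>
      cases ps with
      | nil =>
          simp [PySem.Chars.join_cons_cons, PySem.Chars.join_singleton]
      | cons q qs =>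
          simp only [List.cons_append] at ih ⊢
          rw [PySem.Chars.join_cons_cons, ih (by simp), PySem.Chars.join_cons_cons]
          simp [List.append_assoc]

lemma pvJoin_snoc (bs : List String) (x : String) (h : bs ≠ []) :
    PySem.Str.join " " (bs ++ [x]) = PySem.Str.join " " bs ++ (" " ++ x) := by
  apply String.toList_inj.mp
  simp only [String.toList_append, PySem.Str.toList_join, List.map_append, List.map_cons,
    List.map_nil]
  rw [pvCharsJoin_snoc _ _ _ (by simpa using h)]
  simp [List.append_assoc]

lemma pvJoin_single (x : String) : PySem.Str.join " " [x] = x := by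
  apply String.toList_inj.mp
  simp [PySem.Str.toList_join, PySem.Chars.join_singleton]

lemma pvEntrySize (r : String) (bs : List String) :
    (PySem.Dict.mk (pvEntryOf r bs)).size ≠ 0 := by
  cases bs <;> simp [pvEntryOf, PySem.Dict.size]

lemma pvSize_cons {p : String × String} {t : List (String × String)} :
    (PySem.Dict.mk (p :: t)).size = t.length + 1 := rfl

lemma pvGoB_nil : pvGoB [] = [] := by rw [pvGoB.eq_def]

lemma pvGoB_cons (h : String) (rest : List String) :
    pvGoB (h :: rest) =
      pvMkEntry h (pvCollect (rest.takeWhile (fun l => !pvIsHeader l))) ::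
        pvGoB (rest.dropWhile (fun l => !pvIsHeader l)) := by rw [pvGoB.eq_def]

lemma pvCollect_cons (l : String) (xs : List String) :
    pvCollect (l :: xs) =
      if PySem.Str.strip l = "" then pvCollect xs else PySem.Str.strip l :: pvCollect xs := by
  by_cases h : PySem.Str.strip l = "" <;> simp [pvCollect, h]

-- skip phase: with an empty current dict, non-header lines are ignored
lemma pvFoldA_skip (ls : List String) (refs : List (List (String × String))) :
    ls.foldl pvStepA (refs, PySem.Dict.empty) =
      (ls.dropWhile (fun l => !pvIsHeader l)).foldl pvStepA (refs, PySem.Dict.empty) := by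
  induction ls with
  | nil => rfl
  | cons l ls ih =>
      by_cases hl : pvIsHeader l = true
      · simp [hl]
      · simp only [Bool.not_eq_true] at hl
        have hl' : (PySem.Str.isIn "Article" l || PySem.Str.isIn "Annex" l) = false :=
          (pvIsHeader_def l).trans hl
        have hstep : pvStepA (refs, PySem.Dict.empty) l = (refs, PySem.Dict.empty) := by
          simp only [pvStepA, hl']
          simp [PySem.Dict.size_empty]
        simp [hl, hstep, ih]

-- segment phase: from a current dict for header r with accumulated body bs,
-- A finishes exactly as B's segment decomposition does
lemma pvFoldA_seg (ls : List String) (refs : List (List (String × String)))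
    (r : String) (bs : List String) :
    pvFinish (ls.foldl pvStepA (refs, PySem.Dict.mk (pvEntryOf r bs))) =
      refs ++ pvEntryOf r (bs ++ pvCollect (ls.takeWhile (fun l => !pvIsHeader l))) ::
        pvGoB (ls.dropWhile (fun l => !pvIsHeader l)) := by
  induction ls generalizing refs r bs with
  | nil =>
      simp [pvFinish, pvEntrySize, pvCollect, pvGoB_nil]
  | cons l ls ih =>
      by_cases hl : pvIsHeader l = true
      · have hl' : (PySem.Str.isIn "Article" l || PySem.Str.isIn "Annex" l) = true :=
          (pvIsHeader_def l).trans hl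
        have hstep : pvStepA (refs, PySem.Dict.mk (pvEntryOf r bs)) l =
            (refs ++ [pvEntryOf r bs], PySem.Dict.mk (pvEntryOf (PySem.Str.strip l) [])) := by
          simp only [pvStepA, hl']
          simp [pvEntrySize]
          rfl
        rw [List.foldl_cons, hstep, ih]
        have htw : (l :: ls).takeWhile (fun l => !pvIsHeader l) = [] := by simp [hl]
        have hdw : (l :: ls).dropWhile (fun l => !pvIsHeader l) = l :: ls := by simp [hl]
        rw [htw, hdw, pvGoB_cons]
        simp [pvCollect, pvMkEntry, pvEntryOf]
      · simp only [Bool.not_eq_true] at hl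
        have hl' : (PySem.Str.isIn "Article" l || PySem.Str.isIn "Annex" l) = false :=
          (pvIsHeader_def l).trans hl
        have htw : (l :: ls).takeWhile (fun l => !pvIsHeader l) =
            l :: ls.takeWhile (fun l => !pvIsHeader l) := by simp [hl]
        have hdw : (l :: ls).dropWhile (fun l => !pvIsHeader l) =
            ls.dropWhile (fun l => !pvIsHeader l) := by simp [hl]
        by_cases hs : PySem.Str.strip l = ""
        · have hstep : pvStepA (refs, PySem.Dict.mk (pvEntryOf r bs)) l =
              (refs, PySem.Dict.mk (pvEntryOf r bs)) := by
            simp only [pvStepA, hl']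
            simp [hs]
          rw [List.foldl_cons, hstep, ih, htw, hdw, pvCollect_cons]
          simp [hs]
        · have hstep : pvStepA (refs, PySem.Dict.mk (pvEntryOf r bs)) l =
              (refs, PySem.Dict.mk (pvEntryOf r (bs ++ [PySem.Str.strip l]))) := by
            cases bs with
            | nil =>
                simp only [pvStepA, hl']
                simp [hs, pvEntryOf, pvSize_cons, pvJoin_single]
                rfl
            | cons b bs =>
                have hmod :
                    (PySem.Dict.mk [("reference", r),
                        ("content", PySem.Str.join " " (b :: bs))]).modify "content" ""
                        (fun v => v ++ (" " ++ PySem.Str.strip l)) =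
                      PySem.Dict.mk [("reference", r),
                        ("content", PySem.Str.join " " (b :: bs) ++ (" " ++ PySem.Str.strip l))] := rfl
                simp only [pvStepA, hl']
                simp [hs, pvEntryOf, pvSize_cons, hmod]
                rw [← List.cons_append, pvJoin_snoc (b :: bs) (PySem.Str.strip l) (by simp)]
          rw [List.foldl_cons, hstep, ih, htw, hdw, pvCollect_cons]
          simp [hs, List.append_assoc]

-- ===== VERDICT (by name: the statement is the Claim_ definition above) =====
theorem parse_regulatory_reference_spec : Claim_equal_parse_regulatory_reference := by
  intro text _
  show parse_regulatory_reference text = parse_regulatory_reference_alt text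
  have hA : parse_regulatory_reference text =
      pvFinish (((PySem.Str.split? text "\n").getD []).foldl pvStepA ([], PySem.Dict.empty)) := rfl
  have hB : parse_regulatory_reference_alt text =
      pvGoB (((PySem.Str.split? text "\n").getD []).dropWhile (fun l => !pvIsHeader l)) := rfl
  rw [hA, hB, pvFoldA_skip]
  cases hdrop : ((PySem.Str.split? text "\n").getD []).dropWhile (fun l => !pvIsHeader l) with
  | nil => simp [pvFinish, PySem.Dict.size_empty, pvGoB_nil]
  | cons h t =>
      have hne : ((PySem.Str.split? text "\n").getD []).dropWhile (fun l => !pvIsHeader l) ≠ [] := by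
        simp [hdrop]
      have hh : pvIsHeader h = true := by
        have h0 := List.head_dropWhile_not (fun l => !pvIsHeader l)
          (l := (PySem.Str.split? text "\n").getD []) hne
        simp only [hdrop, List.head_cons] at h0
        simpa using h0
      have hh' : (PySem.Str.isIn "Article" h || PySem.Str.isIn "Annex" h) = true :=
        (pvIsHeader_def h).trans hh
      have hstep : pvStepA ([], PySem.Dict.empty) h =
          ([], PySem.Dict.mk (pvEntryOf (PySem.Str.strip h) [])) := by
        simp only [pvStepA, hh']
        simp [PySem.Dict.size_empty]
        rfl
      rw [List.foldl_cons, hstep, pvFoldA_seg, pvGoB_cons]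
      simp [pvCollect, pvMkEntry, pvEntryOf]
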